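-- pv_equiv track=rewrite | github.com/tarunama/AtCoder | ABC/057/B.py | solve
-- ===== SOURCE A (Python) =====
-- def solve(s_pp, p_pp):
--     p_nums = []
--     for x, y in s_pp:
--         distance = []
--         for xx, yy in p_pp:
--             n = abs(x - xx) + abs(y - yy)
--             distance.append(n)
--         min_distance_idx = distance.index(min(distance))
--         p_nums.append(min_distance_idx + 1)
--     return p_nums
-- ===== SOURCE B (Python) =====
-- def solve(s_pp, p_pp):
--     # checkpoint-major sweep: one outer pass over checkpoints, maintaining every
--     # student's running (best_dist, best_idx); strict '<' keeps the lowest index.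
--     best = None
--     j = 0
--     for px, py in p_pp:
--         ds = [abs(x - px) + abs(y - py) for x, y in s_pp]
--         if best is None:
--             best = [(d, j) for d in ds]
--         else:
--             best = [(d, j) if d < bd else (bd, bi) for d, (bd, bi) in zip(ds, best)]
--         j += 1
--     return [] if best is None else [bi + 1 for _, bi in best]
-- ===== Notes on version B (the rewrite author's own statement) =====
-- stated objective: alternative
-- what changed: Loop interchange: A scans all checkpoints per student (building a distance list, then min, then list.index); B makes one outer sweep over the checkpoints and updates a per-student vector of running (best_dist, best_idx) pairs by zipping it with the current checkpoint's distance column.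
import Mathlib
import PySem

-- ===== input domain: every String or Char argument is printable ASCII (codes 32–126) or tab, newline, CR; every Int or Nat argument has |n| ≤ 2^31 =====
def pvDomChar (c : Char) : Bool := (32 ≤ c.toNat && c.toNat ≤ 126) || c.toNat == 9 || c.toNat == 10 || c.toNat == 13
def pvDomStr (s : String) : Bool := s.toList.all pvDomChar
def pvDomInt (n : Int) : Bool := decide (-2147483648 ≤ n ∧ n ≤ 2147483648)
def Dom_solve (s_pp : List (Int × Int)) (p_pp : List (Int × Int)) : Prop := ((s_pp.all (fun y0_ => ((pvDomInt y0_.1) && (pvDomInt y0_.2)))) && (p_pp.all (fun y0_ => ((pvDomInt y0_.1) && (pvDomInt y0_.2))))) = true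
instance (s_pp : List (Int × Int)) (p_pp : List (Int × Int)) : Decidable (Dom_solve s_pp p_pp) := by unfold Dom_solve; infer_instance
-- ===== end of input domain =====

-- B interchanges the loops: one checkpoint-major sweep maintaining a per-student vector of
-- running (best_dist, best_idx) pairs, instead of A's per-student distance-list/min/index scans.

-- ===== PORT A =====
def solve (s_pp : List (Int × Int)) (p_pp : List (Int × Int)) : List Int :=
  s_pp.foldl (fun p_nums xy =>
    let distance : List Int :=
      p_pp.foldl (fun distance pq => distance ++ [|xy.1 - pq.1| + |xy.2 - pq.2|]) []
    -- min(distance) raises ValueError on an empty list: excluded by Pre_solve; default 0 unreachable there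
    let m : Int := (PySem.List.min? distance (fun y => y)).getD 0
    let min_distance_idx : Nat := (PySem.List.index? distance m).getD 0
    p_nums ++ [(min_distance_idx : Int) + 1]) []

-- ===== PORT B =====
-- state = (best : Option (List (dist × idx)), j); one fold over the checkpoints
def solve_alt (s_pp : List (Int × Int)) (p_pp : List (Int × Int)) : List Int :=
  let st : Option (List (Int × Int)) × Int :=
    p_pp.foldl (fun st pq =>
      let ds : List Int := s_pp.map (fun xy => |xy.1 - pq.1| + |xy.2 - pq.2|)
      let best' : List (Int × Int) :=
        match st.1 with
        | none => ds.map (fun d => (d, st.2))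
        | some b => (ds.zip b).map (fun p => if p.1 < p.2.1 then (p.1, st.2) else p.2)
      (some best', st.2 + 1)) (none, 0)
  match st.1 with
  | none => []
  | some b => b.map (fun p => p.2 + 1)

-- ===== PRECONDITION & SPEC =====
-- With at least one student and no checkpoints, A raises ValueError (min of empty list);
-- Pre_ excludes exactly those inputs.
def Pre_solve (s_pp : List (Int × Int)) (p_pp : List (Int × Int)) : Prop :=
  s_pp = [] ∨ p_pp ≠ []
instance (s_pp : List (Int × Int)) (p_pp : List (Int × Int)) : Decidable (Pre_solve s_pp p_pp) := by unfold Pre_solve; infer_instance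
def pvWitness_solve : (List (Int × Int)) × (List (Int × Int)) := ([(0, 0), (3, 1)], [(2, 2), (0, 1)])

def Spec_solve (s_pp : List (Int × Int)) (p_pp : List (Int × Int)) (out : List Int) : Prop := out = solve_alt s_pp p_pp
instance (s_pp : List (Int × Int)) (p_pp : List (Int × Int)) (out : List Int) : Decidable (Spec_solve s_pp p_pp out) := by unfold Spec_solve; infer_instance

-- ===== CLAIM (what is proved, stated in full; the proofs are below) =====
def Claim_equal_solve : Prop := ∀ (s_pp : List (Int × Int)) (p_pp : List (Int × Int)), Dom_solve s_pp p_pp → Pre_solve s_pp p_pp → Spec_solve s_pp p_pp (solve s_pp p_pp)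

-- ===== LEMMAS AND PROOFS =====

-- per-student sequential strict-min pair loop over the distance column entries
def goP (ds : List Int) (j : Int) (b : Int × Int) : Int × Int :=
  match ds with
  | [] => b
  | d :: rest => goP rest (j + 1) (if d < b.1 then (d, j) else b)

-- same loop, tracking only the index (for comparison with A's min/index form)
def goD (ds : List Int) (i : Int) (bd : Int) (bi : Int) : Int :=
  match ds with
  | [] => bi
  | d :: rest => if d < bd then goD rest (i + 1) d i else goD rest (i + 1) bd bi

theorem goP_snd (ds : List Int) (j : Int) (b : Int × Int) :
    (goP ds j b).2 = goD ds j b.1 b.2 := by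
  induction ds generalizing j b with
  | nil => rfl
  | cons d rest ih =>
    simp only [goP, goD]
    split <;> simp [ih]

theorem foldl_min_le (ds : List Int) (b : Int) : ds.foldl min b ≤ b := by
  induction ds generalizing b with
  | nil => simp
  | cons d rest ih =>
    simp only [List.foldl]
    exact le_trans (ih _) (min_le_left _ _)

theorem foldl_min_self_or_mem (ds : List Int) (b : Int) :
    ds.foldl min b = b ∨ ds.foldl min b ∈ ds := by
  induction ds generalizing b with
  | nil => simp
  | cons d rest ih =>
    simp only [List.foldl, List.mem_cons]
    rcases ih (min b d) with h | h
    · rcases le_total b d with hbd | hdb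
      · left; rw [h, min_eq_left hbd]
      · right; left; rw [h, min_eq_right hdb]
    · right; right; exact h

theorem foldl_append_of {α β : Type} (f : List β → α → List β) (g : α → β)
    (h : ∀ a p, f a p = a ++ [g p]) :
    ∀ (l : List α) (acc : List β), l.foldl f acc = acc ++ l.map g := by
  intro l
  induction l with
  | nil => intro acc; simp
  | cons x rest ih => intro acc; simp [List.foldl, h, ih]

-- streaming strict-min loop = first index of the foldl-minimum (offset by i), else the incoming bi
theorem goD_spec (ds : List Int) (i bd bi : Int) :
    goD ds i bd bi =
      if ds.foldl min bd < bd
      then i + (((PySem.List.index? ds (ds.foldl min bd)).getD 0 : Nat) : Int)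
      else bi := by
  induction ds generalizing i bd bi with
  | nil => simp [goD]
  | cons d rest ih =>
    simp only [goD, List.foldl]
    by_cases hdb : d < bd
    · rw [if_pos hdb, ih, min_eq_right hdb.le]
      have hle : rest.foldl min d ≤ d := foldl_min_le rest d
      rw [if_pos (lt_of_le_of_lt hle hdb)]
      by_cases hmd : rest.foldl min d < d
      · have hne : d ≠ rest.foldl min d := by
          intro h; rw [← h] at hmd; exact absurd hmd (lt_irrefl d)
        rw [if_pos hmd, PySem.List.index?_cons_of_ne _ hne]
        have hmem : rest.foldl min d ∈ rest := by
          rcases foldl_min_self_or_mem rest d with h | h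
          · rw [h] at hmd; exact absurd hmd (lt_irrefl d)
          · exact h
        obtain ⟨k, hk⟩ := Option.isSome_iff_exists.mp
          ((PySem.List.index?_isSome_iff rest _).mpr hmem)
        rw [hk]; simp; ring
      · have hd : rest.foldl min d = d := le_antisymm hle (not_lt.mp hmd)
        rw [if_neg hmd, hd, PySem.List.index?_cons_self]
        simp
    · rw [if_neg hdb, ih, min_eq_left (not_lt.mp hdb)]
      by_cases hm : rest.foldl min bd < bd
      · have hne : d ≠ rest.foldl min bd := by
          intro h; rw [← h] at hm; exact absurd hm hdb
        rw [if_pos hm, if_pos hm, PySem.List.index?_cons_of_ne _ hne]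
        obtain ⟨k, hk⟩ := Option.isSome_iff_exists.mp
          ((PySem.List.index?_isSome_iff rest _).mpr (by
            rcases foldl_min_self_or_mem rest bd with h | h
            · rw [h] at hm; exact absurd hm (lt_irrefl _)
            · exact h))
        rw [hk]; simp; ring
      · rw [if_neg hm, if_neg hm]

-- A's per-student pipeline (distance list, min, first index) = the streaming loop goD
theorem one_student (x y bx by_ : Int) (rest : List (Int × Int)) :
    (let distance : List Int :=
        ((bx, by_) :: rest).foldl (fun d pq => d ++ [|x - pq.1| + |y - pq.2|]) ([] : List Int)
      let m : Int := (PySem.List.min? distance (fun y => y)).getD 0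
      (((PySem.List.index? distance m).getD 0 : Nat) : Int) + 1)
    = goD (rest.map (fun pq => |x - pq.1| + |y - pq.2|)) 1 (|x - bx| + |y - by_|) 0 + 1 := by
  rw [foldl_append_of _ (fun pq : Int × Int => |x - pq.1| + |y - pq.2|) (fun a p => rfl)]
  simp only [List.nil_append, List.map]
  set d0 := |x - bx| + |y - by_| with hd0
  set ds := rest.map (fun pq => |x - pq.1| + |y - pq.2|) with hds
  rw [goD_spec]
  rw [PySem.List.min?_id_cons d0 ds]
  simp only [Option.getD_some]
  by_cases hm : ds.foldl min d0 < d0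
  · have hne : d0 ≠ ds.foldl min d0 := by
      intro h; rw [← h] at hm; exact absurd hm (lt_irrefl d0)
    rw [if_pos hm, PySem.List.index?_cons_of_ne _ hne]
    obtain ⟨k, hk⟩ := Option.isSome_iff_exists.mp
      ((PySem.List.index?_isSome_iff ds _).mpr (by
        rcases foldl_min_self_or_mem ds d0 with h | h
        · rw [h] at hm; exact absurd hm (lt_irrefl _)
        · exact h))
    rw [hk]; simp; ring
  · have hd : ds.foldl min d0 = d0 := le_antisymm (foldl_min_le ds d0) (not_lt.mp hm)
    rw [if_neg hm, hd, PySem.List.index?_cons_self]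
    simp

-- B's fold step, named for the invariant proofs
def stepB (s_pp : List (Int × Int)) (st : Option (List (Int × Int)) × Int) (pq : Int × Int) :
    Option (List (Int × Int)) × Int :=
  let ds : List Int := s_pp.map (fun xy => |xy.1 - pq.1| + |xy.2 - pq.2|)
  let best' : List (Int × Int) :=
    match st.1 with
    | none => ds.map (fun d => (d, st.2))
    | some b => (ds.zip b).map (fun p => if p.1 < p.2.1 then (p.1, st.2) else p.2)
  (some best', st.2 + 1)

theorem solve_alt_eq_fold (s_pp p_pp : List (Int × Int)) :
    solve_alt s_pp p_pp =
      match (p_pp.foldl (stepB s_pp) (none, 0)).1 with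
      | none => []
      | some b => b.map (fun p => p.2 + 1) := rfl

theorem zip_map_self {α β : Type} (l : List α) (g : α → β) :
    l.zip (l.map g) = l.map (fun a => (a, g a)) := by
  induction l with
  | nil => rfl
  | cons x rest ih => simp [ih]

theorem zip_self_map {α β γ : Type} (l : List α) :
    ∀ (b : List β) (h : α × β → γ), l.zip ((l.zip b).map h) = (l.zip b).map (fun sb => (sb.1, h sb)) := by
  induction l with
  | nil => intro b h; rfl
  | cons x rest ih =>
    intro b h
    cases b with
    | nil => rfl
    | cons y bs => simp [List.zip_cons_cons, ih]

-- the invariant: folding the remaining checkpoints from a full per-student vector b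
-- yields, for each student, the sequential strict-min pair loop goP continued from its entry
theorem fold_some (s_pp : List (Int × Int)) :
    ∀ (ps : List (Int × Int)) (j : Int) (b : List (Int × Int)), b.length = s_pp.length →
      ps.foldl (stepB s_pp) (some b, j) =
        (some ((s_pp.zip b).map (fun sb =>
          goP (ps.map (fun pq => |sb.1.1 - pq.1| + |sb.1.2 - pq.2|)) j sb.2)), j + ps.length) := by
  intro ps
  induction ps with
  | nil =>
    intro j b hb
    simp only [List.foldl_nil, List.length_nil, List.map_nil, goP]
    have hmz : (s_pp.zip b).map (fun sb => sb.2) = b :=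
      List.map_snd_zip (le_of_eq hb)
    rw [hmz]
    norm_num
  | cons pq rest ih =>
    intro j b hb
    rw [List.foldl_cons]
    have hstep : stepB s_pp (some b, j) pq =
        (some ((s_pp.zip b).map (fun sb =>
          if |sb.1.1 - pq.1| + |sb.1.2 - pq.2| < sb.2.1
          then (|sb.1.1 - pq.1| + |sb.1.2 - pq.2|, j) else sb.2)), j + 1) := by
      simp only [stepB, List.zip_map_left, List.map_map]
      rfl
    rw [hstep]
    rw [ih (j + 1) _ (by
      rw [List.length_map, List.length_zip, hb, min_self])]
    rw [zip_self_map, List.map_map]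
    simp only [Prod.mk.injEq]
    constructor
    · congr 1
    · simp only [List.length_cons]
      push_cast
      ring

-- with no students the per-student vector is empty throughout and the result is []
theorem fold_empty_students :
    ∀ (ps : List (Int × Int)) (j : Int),
      (ps.foldl (stepB []) (some [], j)).1 = some [] := by
  intro ps
  induction ps with
  | nil => intro j; rfl
  | cons pq rest ih => intro j; exact ih (j + 1)

-- ===== VERDICT (by name: the statement is the Claim_ definition above) =====
theorem solve_spec : Claim_equal_solve := by
  intro s_pp p_pp _ hpre
  unfold Spec_solve
  cases hps : p_pp with
  | nil =>
    rcases hpre with h | h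
    · subst h; subst hps; rfl
    · exact absurd hps h
  | cons p0 rest =>
    obtain ⟨bx, by_⟩ := p0
    cases s_pp with
    | nil =>
      rw [solve_alt_eq_fold, List.foldl_cons]
      have h0 : stepB [] (none, 0) (bx, by_) = (some [], 1) := rfl
      rw [h0, fold_empty_students rest 1]
      rfl
    | cons s0 ss =>
      -- A's side: fold appending one value per student = map
      rw [show solve (s0 :: ss) ((bx, by_) :: rest) =
        (s0 :: ss).map (fun xy =>
          (let distance : List Int :=
              ((bx, by_) :: rest).foldl (fun d pq => d ++ [|xy.1 - pq.1| + |xy.2 - pq.2|]) []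
            let m : Int := (PySem.List.min? distance (fun y => y)).getD 0
            (((PySem.List.index? distance m).getD 0 : Nat) : Int) + 1)) from by
        unfold solve
        rw [foldl_append_of _ (fun xy : Int × Int =>
          (let distance : List Int :=
              ((bx, by_) :: rest).foldl (fun d pq => d ++ [|xy.1 - pq.1| + |xy.2 - pq.2|]) []
            let m : Int := (PySem.List.min? distance (fun y => y)).getD 0
            (((PySem.List.index? distance m).getD 0 : Nat) : Int) + 1)) (fun a p => rfl)]
        simp]
      -- B's side: first checkpoint initialises, the invariant handles the rest
      rw [solve_alt_eq_fold, List.foldl_cons]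
      have h0 : stepB (s0 :: ss) (none, 0) (bx, by_) =
          (some (((s0 :: ss).map (fun xy => |xy.1 - bx| + |xy.2 - by_|)).map
            (fun d => (d, (0 : Int)))), 1) := rfl
      rw [h0, List.map_map,
        fold_some (s0 :: ss) rest 1 _ (by rw [List.length_map]),
        zip_map_self, List.map_map]
      dsimp only
      rw [List.map_map]
      apply List.map_congr_left
      intro xy _
      simp only [Function.comp]
      rw [one_student xy.1 xy.2 bx by_ rest, goP_snd]
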